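-- pv_equiv track=rewrite | github.com/JAAFAR1996/ai-teddy-bear- | src/application/services/ai/emotion_analyzer_service.py | _is_improving_pattern
-- ===== SOURCE A (Python) =====
-- from typing import Any, Dict, List, Optional
--
-- def _is_improving_pattern(emotions: List[str]) -> bool:
--     """Check if emotions are improving (getting more positive)"""
--     positive_emotions = {"joy", "love", "excitement", "curiosity"}
--     negative_emotions = {"sadness", "anger", "fear"}
--
--     if len(emotions) < 3:
--         return False
--
--     # Check if recent emotions are more positive than earlier ones
--     early_positive = sum(
--         1 for e in emotions[: len(emotions) // 2] if e in positive_emotions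
--     )
--     late_positive = sum(
--         1 for e in emotions[len(emotions) // 2:] if e in positive_emotions
--     )
--
--     early_negative = sum(
--         1 for e in emotions[: len(emotions) // 2] if e in negative_emotions
--     )
--     late_negative = sum(
--         1 for e in emotions[len(emotions) // 2:] if e in negative_emotions
--     )
--
--     return late_positive > early_positive or late_negative < early_negative
-- ===== SOURCE B (Python) =====
-- from typing import List
--
-- def _apply(e, sign, pd, nd):
--     positive_emotions = {"joy", "love", "excitement", "curiosity"}
--     negative_emotions = {"sadness", "anger", "fear"}
--     if e in positive_emotions:
--         pd += sign
--     if e in negative_emotions: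
--         nd += sign
--     return pd, nd
--
-- def _is_improving_pattern(emotions: List[str]) -> bool:
--     """Check if emotions are improving (getting more positive)"""
--     n = len(emotions)
--     if n < 3:
--         return False
--     # Two pointers closing in from both ends: each step pairs one early
--     # element (weight -1) with one late element (weight +1), accumulating
--     # the positive delta pd = late_pos - early_pos and negative delta
--     # nd = late_neg - early_neg directly; no slices, no four counters.
--     pd = nd = 0
--     i, j = 0, n - 1
--     while i < j:
--         pd, nd = _apply(emotions[j], 1, pd, nd)
--         pd, nd = _apply(emotions[i], -1, pd, nd)
--         i += 1
--         j -= 1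
--     if i == j:  # odd length: the middle element belongs to the late half
--         pd, nd = _apply(emotions[i], 1, pd, nd)
--     return pd > 0 or nd < 0
-- ===== Notes on version B (the rewrite author's own statement) =====
-- stated objective: alternative
-- what changed: Replaces A's four slice-comprehension counts and two-count comparisons by a two-pointer scan closing in from both ends that accumulates the signed deltas late_pos-early_pos and late_neg-early_neg directly (middle element of an odd list folded into the late half), returning pd > 0 or nd < 0.
import Mathlib
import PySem

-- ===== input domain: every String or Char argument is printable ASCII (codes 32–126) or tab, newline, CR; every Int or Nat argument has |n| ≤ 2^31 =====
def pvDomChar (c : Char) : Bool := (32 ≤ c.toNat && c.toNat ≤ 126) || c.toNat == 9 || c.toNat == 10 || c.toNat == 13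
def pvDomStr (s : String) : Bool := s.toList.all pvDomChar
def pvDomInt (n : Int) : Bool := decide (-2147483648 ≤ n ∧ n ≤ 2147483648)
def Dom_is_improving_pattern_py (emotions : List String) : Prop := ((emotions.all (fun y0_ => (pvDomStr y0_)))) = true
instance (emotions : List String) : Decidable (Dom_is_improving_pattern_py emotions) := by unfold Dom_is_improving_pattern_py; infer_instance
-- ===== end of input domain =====

-- B replaces A's four slice-comprehension counts by a two-pointer scan from both ends
-- accumulating the signed deltas late-early directly; same return value.

-- ===== PORT A =====
def pvPositive : List String := ["joy", "love", "excitement", "curiosity"]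
def pvNegative : List String := ["sadness", "anger", "fear"]

def is_improving_pattern_py (emotions : List String) : Bool :=
  if emotions.length < 3 then false
  else
    let mid : Int := PySem.Int.floordiv (emotions.length : Int) 2
    let early_positive : Int := ((PySem.List.slice emotions none (some mid)).countP (fun e => pvPositive.contains e) : Nat)
    let late_positive : Int := ((PySem.List.slice emotions (some mid) none).countP (fun e => pvPositive.contains e) : Nat)
    let early_negative : Int := ((PySem.List.slice emotions none (some mid)).countP (fun e => pvNegative.contains e) : Nat)
    let late_negative : Int := ((PySem.List.slice emotions (some mid) none).countP (fun e => pvNegative.contains e) : Nat)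
    decide (late_positive > early_positive) || decide (late_negative < early_negative)

-- ===== PORT B =====
def pvApply (e : String) (sign : Int) (pd nd : Int) : Int × Int :=
  ((if pvPositive.contains e then pd + sign else pd),
   (if pvNegative.contains e then nd + sign else nd))

-- the while loop; indices always stay in range, so getD "" is exact for emotions[i]/emotions[j]
def pvTwoPtr (es : List String) (i j : Nat) (pd nd : Int) : Nat × Nat × Int × Int :=
  if _h : i < j then
    let p1 := pvApply (es.getD j "") 1 pd nd
    let p2 := pvApply (es.getD i "") (-1) p1.1 p1.2
    pvTwoPtr es (i + 1) (j - 1) p2.1 p2.2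
  else (i, j, pd, nd)
termination_by j - i
decreasing_by omega

def is_improving_pattern_py_alt (emotions : List String) : Bool :=
  let n := emotions.length
  if n < 3 then false
  else
    let r := pvTwoPtr emotions 0 (n - 1) 0 0
    let p := if r.1 == r.2.1 then pvApply (emotions.getD r.1 "") 1 r.2.2.1 r.2.2.2
             else (r.2.2.1, r.2.2.2)
    decide (p.1 > 0) || decide (p.2 < 0)

-- ===== PRECONDITION & SPEC =====
def Spec_is_improving_pattern_py (emotions : List String) (out : Bool) : Prop := out = is_improving_pattern_py_alt emotions
instance (emotions : List String) (out : Bool) : Decidable (Spec_is_improving_pattern_py emotions out) := by unfold Spec_is_improving_pattern_py; infer_instance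

-- ===== CLAIM (what is proved, stated in full; the proofs are below) =====
def Claim_equal_is_improving_pattern_py : Prop := ∀ (emotions : List String), Dom_is_improving_pattern_py emotions → Spec_is_improving_pattern_py emotions (is_improving_pattern_py emotions)

-- ===== LEMMAS AND PROOFS =====

-- step count of the two-pointer loop started at (i, j)
def pvStp (i j : Nat) : Nat := (j - i + 1) / 2
-- positive/negative counts of a list, as Int
def pvPc (l : List String) : Int := (l.countP (fun e => pvPositive.contains e) : Nat)
def pvNc (l : List String) : Int := (l.countP (fun e => pvNegative.contains e) : Nat)

theorem pvTwoPtr_spec (es : List String) (k : Nat) :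
    ∀ i j pd nd, j - i ≤ k → j < es.length →
    pvTwoPtr es i j pd nd =
      (i + pvStp i j, j - pvStp i j,
       pd + pvPc ((es.drop (j + 1 - pvStp i j)).take (pvStp i j))
          - pvPc ((es.drop i).take (pvStp i j)),
       nd + pvNc ((es.drop (j + 1 - pvStp i j)).take (pvStp i j))
          - pvNc ((es.drop i).take (pvStp i j))) := by
  induction k with
  | zero =>
      intro i j pd nd hk hj
      have hij : ¬ i < j := by omega
      have hs : pvStp i j = 0 := by unfold pvStp; omega
      rw [pvTwoPtr, dif_neg hij]
      simp [hs, pvPc, pvNc]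
  | succ k ih =>
      intro i j pd nd hk hj
      by_cases hij : i < j
      · have hs : pvStp i j = pvStp (i + 1) (j - 1) + 1 := by unfold pvStp; omega
        have hs' : pvStp (i + 1) (j - 1) ≤ j - 1 - (i + 1) := by unfold pvStp; omega
        rw [pvTwoPtr, dif_pos hij]
        rw [ih (i + 1) (j - 1) _ _ (by omega) (by omega)]
        -- rewrite the segments
        have hi : i < es.length := by omega
        have hdropi : es.drop i = es[i] :: es.drop (i + 1) :=
          List.drop_eq_getElem_cons hi
        set s' := pvStp (i + 1) (j - 1) with hs'def
        have hearly : (es.drop i).take (s' + 1) = es[i] :: (es.drop (i + 1)).take s' := by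
          rw [hdropi]; rfl
        -- late segment: starts at a = j + 1 - (s'+1) = j - s'; ends at index j
        have ha : j + 1 - (s' + 1) = j - s' := by omega
        have hlate : (es.drop (j - s')).take (s' + 1)
            = (es.drop (j - 1 + 1 - s')).take s' ++ [es[j]] := by
          have h1 : j - 1 + 1 - s' = j - s' := by omega
          rw [h1, List.take_succ]
          congr 1
          have hidx : (es.drop (j - s'))[s']? = some es[j] := by
            rw [List.getElem?_drop]
            have : j - s' + s' = j := by omega
            rw [this, List.getElem?_eq_getElem hj]
          simp [hidx]
        have hPc_early : pvPc ((es.drop i).take (s' + 1))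
            = (if pvPositive.contains es[i] then 1 else 0) + pvPc ((es.drop (i + 1)).take s') := by
          rw [hearly]; unfold pvPc; rw [List.countP_cons]
          by_cases h : pvPositive.contains es[i] <;> simp [h] <;> push_cast <;> ring
        have hNc_early : pvNc ((es.drop i).take (s' + 1))
            = (if pvNegative.contains es[i] then 1 else 0) + pvNc ((es.drop (i + 1)).take s') := by
          rw [hearly]; unfold pvNc; rw [List.countP_cons]
          by_cases h : pvNegative.contains es[i] <;> simp [h] <;> push_cast <;> ring
        have hPc_late : pvPc ((es.drop (j - s')).take (s' + 1))
            = pvPc ((es.drop (j - 1 + 1 - s')).take s') + (if pvPositive.contains es[j] then 1 else 0) := by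
          rw [hlate]; unfold pvPc; rw [List.countP_append]
          by_cases h : pvPositive.contains es[j] <;> simp [h, List.countP_cons] <;> push_cast <;> ring
        have hNc_late : pvNc ((es.drop (j - s')).take (s' + 1))
            = pvNc ((es.drop (j - 1 + 1 - s')).take s') + (if pvNegative.contains es[j] then 1 else 0) := by
          rw [hlate]; unfold pvNc; rw [List.countP_append]
          by_cases h : pvNegative.contains es[j] <;> simp [h, List.countP_cons] <;> push_cast <;> ring
        have hgetj : es.getD j "" = es[j] := List.getD_eq_getElem es "" hj
        have hgeti : es.getD i "" = es[i] := List.getD_eq_getElem es "" hi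
        rw [hs, ha]
        simp only [pvApply, hgetj, hgeti, hPc_early, hNc_early, hPc_late, hNc_late,
          Prod.mk.injEq]
        refine ⟨by omega, by omega, by split_ifs <;> ring, by split_ifs <;> ring⟩
      · have hs : pvStp i j = 0 := by unfold pvStp; omega
        rw [pvTwoPtr, dif_neg hij]
        simp [hs, pvPc, pvNc]

-- ===== VERDICT (by name: the statement is the Claim_ definition above) =====
theorem is_improving_pattern_py_spec : Claim_equal_is_improving_pattern_py := by
  intro emotions _
  unfold Spec_is_improving_pattern_py is_improving_pattern_py is_improving_pattern_py_alt
  by_cases hlen : emotions.length < 3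
  · simp [hlen]
  · simp only [if_neg hlen]
    set n := emotions.length with hn
    set m : Nat := n / 2 with hm
    have hmid : PySem.Int.floordiv (n : Int) 2 = (m : Int) := by
      exact_mod_cast PySem.Int.floordiv_natCast n 2
    have htake : PySem.List.slice emotions none (some ((m : Nat) : Int)) = emotions.take m := by
      rw [PySem.List.slice_to emotions (by positivity)]; simp
    have hdrop : PySem.List.slice emotions (some ((m : Nat) : Int)) none = emotions.drop m := by
      rw [PySem.List.slice_from emotions (by positivity)]; simp
    have hstp : pvStp 0 (n - 1) = m := by unfold pvStp; omega
    have hloop := pvTwoPtr_spec emotions (n - 1) 0 (n - 1) 0 0 (by omega) (by omega)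
    rw [hstp] at hloop
    have ha : n - 1 + 1 - m = n - m := by omega
    rw [ha] at hloop
    by_cases hodd : n % 2 = 1
    · -- odd length: loop meets at the middle index m; middle element is late
      have hmlt : m < n := by omega
      have hbe : ((0 + m : Nat) == n - 1 - m) = true := by
        simp only [beq_iff_eq]; omega
      have hget : emotions.getD (0 + m) "" = emotions[m]'(by omega) := by
        simpa using List.getD_eq_getElem emotions "" (by omega : 0 + m < emotions.length)
      have hnm : n - m = m + 1 := by omega
      have hdm : emotions.drop m = emotions[m]'(by omega) :: emotions.drop (m + 1) :=
        List.drop_eq_getElem_cons (by omega)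
      have htl : (emotions.drop (m + 1)).take m = emotions.drop (m + 1) :=
        List.take_of_length_le (by simp; omega)
      rw [hnm, htl, List.drop_zero] at hloop
      rw [hloop, if_pos hbe]
      simp only [pvApply, hget, hmid, htake, hdrop, hdm]
      unfold pvPc pvNc
      simp only [List.countP_cons]
      congr 1 <;> rw [decide_eq_decide] <;> split_ifs <;> push_cast <;> omega
    · -- even length: loop ends with i ≠ j; halves are exactly take m / drop m
      have hne : ¬ (((0 + m : Nat) == n - 1 - m) = true) := by
        simp only [beq_iff_eq]; omega
      have hnm : n - m = m := by omega
      have htakeall : (emotions.drop m).take m = emotions.drop m :=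
        List.take_of_length_le (by simp; omega)
      rw [hnm, htakeall, List.drop_zero] at hloop
      rw [hloop, if_neg hne]
      simp only [hmid, htake, hdrop]
      unfold pvPc pvNc
      congr 1 <;> rw [decide_eq_decide] <;> push_cast <;> omega
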